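-- pv_equiv track=rewrite | github.com/kkulkuic/demo-agent-ccc | core/consent.py | looks_like_bot_challenge
-- ===== SOURCE A (Python) =====
-- from typing import Optional
--
-- def looks_like_bot_challenge(title: Optional[str], body_text: Optional[str]) -> bool:
--     hay = f"{title or ''} {body_text or ''}".lower()
--     keywords = [
--         "not a robot",
--         "verify you are human",
--         "verification",
--         "captcha",
--         "access denied",
--         "unusual traffic",
--         "just a moment",
--         "checking your browser",
--         "cloudflare",
--         "enable cookies",
--         "are you human",
--         "blocked",
--         "security check",
--     ]
--     return any(k in hay for k in keywords)
-- ===== SOURCE B (Python) =====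
-- from typing import Optional
--
-- KEYWORDS = [
--     "not a robot",
--     "verify you are human",
--     "verification",
--     "captcha",
--     "access denied",
--     "unusual traffic",
--     "just a moment",
--     "checking your browser",
--     "cloudflare",
--     "enable cookies",
--     "are you human",
--     "blocked",
--     "security check",
-- ]
--
--
-- def looks_like_bot_challenge(title: Optional[str], body_text: Optional[str]) -> bool:
--     hay = f"{title or ''} {body_text or ''}".lower()
--     # one left-to-right scan: at each position, test whether any keyword starts there
--     return any(
--         hay.startswith(k, i)
--         for i in range(len(hay) + 1)
--         for k in KEYWORDS
--     )
-- ===== Notes on version B (the rewrite author's own statement) =====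
-- stated objective: alternative
-- what changed: B replaces A's thirteen independent substring searches (one full pass of the haystack per keyword) by a single left-to-right scan of haystack positions, testing at each position whether some keyword is anchored there.
import Mathlib
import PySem

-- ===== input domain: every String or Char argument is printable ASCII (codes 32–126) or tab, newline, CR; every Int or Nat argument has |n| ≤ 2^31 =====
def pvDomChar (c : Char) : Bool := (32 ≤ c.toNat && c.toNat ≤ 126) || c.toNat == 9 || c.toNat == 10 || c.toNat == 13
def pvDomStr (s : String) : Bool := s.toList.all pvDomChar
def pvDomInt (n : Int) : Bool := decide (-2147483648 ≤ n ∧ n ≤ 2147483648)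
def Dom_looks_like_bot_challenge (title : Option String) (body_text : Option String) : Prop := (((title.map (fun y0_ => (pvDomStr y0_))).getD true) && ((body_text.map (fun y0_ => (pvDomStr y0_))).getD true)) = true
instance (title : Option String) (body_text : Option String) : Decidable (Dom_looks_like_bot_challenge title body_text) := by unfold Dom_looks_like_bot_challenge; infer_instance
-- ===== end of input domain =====

-- ===== PORT A =====
-- B replaces A's per-keyword substring searches by one positional scan; equal return value proved below.
def looks_like_bot_challenge (title : Option String) (body_text : Option String) : Bool :=
  let hay := PySem.Str.lower (title.getD "" ++ " " ++ body_text.getD "")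
  let keywords : List String :=
    ["not a robot", "verify you are human", "verification", "captcha",
     "access denied", "unusual traffic", "just a moment", "checking your browser",
     "cloudflare", "enable cookies", "are you human", "blocked", "security check"]
  keywords.any (fun k => PySem.Str.isIn k hay)

-- ===== PORT B =====
def pvKeywords : List String :=
  ["not a robot", "verify you are human", "verification", "captcha",
   "access denied", "unusual traffic", "just a moment", "checking your browser",
   "cloudflare", "enable cookies", "are you human", "blocked", "security check"]

-- hay.startswith(k, i) with 0 ≤ i ≤ len(hay) is exactly 'k is a prefix of hay[i:]'.
def looks_like_bot_challenge_alt (title : Option String) (body_text : Option String) : Bool :=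
  let hay := (PySem.Str.lower (title.getD "" ++ " " ++ body_text.getD "")).toList
  (List.range (hay.length + 1)).any (fun i =>
    pvKeywords.any (fun k => PySem.Chars.startswith (hay.drop i) k.toList))

-- ===== PRECONDITION & SPEC =====
def Spec_looks_like_bot_challenge (title : Option String) (body_text : Option String) (out : Bool) : Prop := out = looks_like_bot_challenge_alt title body_text
instance (title : Option String) (body_text : Option String) (out : Bool) : Decidable (Spec_looks_like_bot_challenge title body_text out) := by unfold Spec_looks_like_bot_challenge; infer_instance

-- ===== CLAIM (what is proved, stated in full; the proofs are below) =====
def Claim_equal_looks_like_bot_challenge : Prop := ∀ (title : Option String) (body_text : Option String), Dom_looks_like_bot_challenge title body_text → Spec_looks_like_bot_challenge title body_text (looks_like_bot_challenge title body_text)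

-- ===== LEMMAS AND PROOFS =====

-- 'sub in s' (infix) holds iff sub is anchored (a prefix) at some position i ≤ len s
lemma infix_iff_exists_prefix_drop (sub s : List Char) :
    sub <:+: s ↔ ∃ i < s.length + 1, sub <+: s.drop i := by
  constructor
  · intro h
    obtain ⟨j, hj⟩ := (PySem.Chars.exists_prefix_drop_iff_isIn sub s).mpr
      ((PySem.Chars.isIn_iff_infix sub s).mpr h)
    refine ⟨min j s.length, by omega, ?_⟩
    rcases Nat.lt_or_ge s.length j with hlt | hle
    · have hnil : s.drop j = [] := List.drop_eq_nil_of_le (by omega)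
      have hsub : sub = [] := List.prefix_nil.mp (hnil ▸ hj)
      simp [hsub]
    · simpa [Nat.min_eq_left hle] using hj
  · rintro ⟨i, _, hi⟩
    exact (PySem.Chars.isIn_iff_infix sub s).mp
      ((PySem.Chars.exists_prefix_drop_iff_isIn sub s).mp ⟨i, hi⟩)

-- ===== VERDICT (by name: the statement is the Claim_ definition above) =====
theorem looks_like_bot_challenge_spec : Claim_equal_looks_like_bot_challenge := by
  intro title body_text _
  unfold Spec_looks_like_bot_challenge looks_like_bot_challenge looks_like_bot_challenge_alt
  have key : ∀ (a b : Bool), (a = true ↔ b = true) → a = b := by decide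
  apply key
  simp only [List.any_eq_true, List.mem_range, PySem.Chars.startswith_iff,
    PySem.Str.isIn_iff_infix, pvKeywords]
  constructor
  · rintro ⟨k, hk, hinf⟩
    obtain ⟨i, hi, hp⟩ := (infix_iff_exists_prefix_drop _ _).mp hinf
    exact ⟨i, hi, k, hk, hp⟩
  · rintro ⟨i, hi, k, hk, hp⟩
    exact ⟨k, hk, (infix_iff_exists_prefix_drop _ _).mpr ⟨i, hi, hp⟩⟩
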